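-- pv_equiv track=rewrite | github.com/bobbycyiii/coover | extraction.py | cyclically_equal
-- ===== SOURCE A (Python) =====
-- def cyclically_equal(A,B):
--     # Shiloach's algorithm.
--     # See ``On the shape of mathematical arguments''
--     # by A. J. M. van Gasteren, Springer Verlag, 1990.
--     if len(A) != len(B):
--         return False
--     N = len(A)
--     h,i,j = 0,0,0
--     while h < N and i < N and j < N:
--         if   A[(i+h)%N] == B[(j+h)%N]:
--             h = h + 1
--         elif A[(i+h)%N] >  B[(j+h)%N]:
--             i = i + h + 1
--             h = 0
--         elif B[(j+h)%N] >  A[(i+h)%N]: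
--             j = j + h + 1
--             h = 0
--     return h >= N
-- ===== SOURCE B (Python) =====
-- def cyclically_equal(A, B):
--     # Doubling search: B is a rotation of A iff B occurs in A+A at some offset < len(A).
--     # Equality-only (no element ordering), early exit on the first mismatch at each offset.
--     if len(A) != len(B):
--         return False
--     if not A:
--         return True
--     D = A + A
--     return any(all(D[k + t] == B[t] for t in range(len(B))) for k in range(len(A)))
-- ===== Notes on version B (the rewrite author's own statement) =====
-- stated objective: alternative
-- what changed: Replaces Shiloach's order-based three-pointer comparison loop (which uses < and > on elements) by an equality-only doubling search: B is a rotation of A iff B occurs as a contiguous block of A+A at some offset below len(A), checked with an early-exit elementwise scan.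
import Mathlib
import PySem

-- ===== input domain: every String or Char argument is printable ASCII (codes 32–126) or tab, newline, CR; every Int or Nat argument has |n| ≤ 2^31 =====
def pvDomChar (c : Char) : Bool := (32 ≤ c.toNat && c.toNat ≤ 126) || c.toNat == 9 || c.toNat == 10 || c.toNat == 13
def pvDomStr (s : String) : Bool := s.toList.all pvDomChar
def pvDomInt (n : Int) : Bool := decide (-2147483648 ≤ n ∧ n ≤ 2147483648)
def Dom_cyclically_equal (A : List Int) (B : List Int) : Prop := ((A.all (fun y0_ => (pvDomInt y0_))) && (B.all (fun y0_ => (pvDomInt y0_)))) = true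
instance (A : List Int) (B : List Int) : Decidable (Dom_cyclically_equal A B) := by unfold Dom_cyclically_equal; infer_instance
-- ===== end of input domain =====

-- B replaces Shiloach's three-pointer comparison loop by a doubling search (does B occur in A ++ A?); equality-only, no element order used.

-- ===== PORT A =====
-- Shiloach's while loop over the state (h, i, j).  Python's A[(i+h)%N] has 0 ≤ (i+h)%N < N = len(A),
-- always in range, so getD with the Nat mod is exact.  Python's last branch is 'elif B[..] > A[..]'
-- with no else; on ints trichotomy makes that guard true whenever the first two fail, so it is
-- transliterated as the final else.  Each step increases h+i+j by 1, bounded by 3N: termination.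
def ceLoop (A B : List Int) (N : Nat) (h i j : Nat) : Bool :=
  if h < N ∧ i < N ∧ j < N then
    if A.getD ((i + h) % N) 0 = B.getD ((j + h) % N) 0 then
      ceLoop A B N (h + 1) i j
    else if A.getD ((i + h) % N) 0 > B.getD ((j + h) % N) 0 then
      ceLoop A B N 0 (i + h + 1) j
    else
      ceLoop A B N 0 i (j + h + 1)
  else
    decide (h ≥ N)
termination_by 3 * N - (h + i + j)
decreasing_by all_goals omega

def cyclically_equal (A : List Int) (B : List Int) : Bool :=
  if A.length ≠ B.length then false
  else ceLoop A B A.length 0 0 0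

-- ===== PORT B =====
-- Doubling search with an early-exit elementwise scan; all indices k+t (k < len(A), t < len(B) = len(A))
-- are in range for A ++ A, so pyGetD is exact.
def cyclically_equal_alt (A : List Int) (B : List Int) : Bool :=
  if A.length ≠ B.length then false
  else if A = [] then true
  else
    (PySem.List.pyRange 0 (A.length : Int) 1).any (fun k =>
      (PySem.List.pyRange 0 (B.length : Int) 1).all (fun t =>
        PySem.List.pyGetD (A ++ A) (k + t) 0 == PySem.List.pyGetD B t 0))

-- ===== PRECONDITION & SPEC =====
def Spec_cyclically_equal (A : List Int) (B : List Int) (out : Bool) : Prop := out = cyclically_equal_alt A B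
instance (A : List Int) (B : List Int) (out : Bool) : Decidable (Spec_cyclically_equal A B out) := by unfold Spec_cyclically_equal; infer_instance

-- ===== CLAIM (what is proved, stated in full; the proofs are below) =====
def Claim_equal_cyclically_equal : Prop := ∀ (A : List Int) (B : List Int), Dom_cyclically_equal A B → Spec_cyclically_equal A B (cyclically_equal A B)

-- ===== LEMMAS AND PROOFS =====

-- (A ++ A)[k+t] is A[(k+t) % N].
theorem double_getD (A : List Int) (k t N : Nat) (hN : N = A.length) (hk : k < N) (ht : t < N) :
    (A ++ A).getD (k + t) 0 = A.getD ((k + t) % N) 0 := by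
  subst hN
  have hlt : k + t < (A ++ A).length := by simp; omega
  by_cases hc : k + t < A.length
  · rw [Nat.mod_eq_of_lt hc, List.getD_eq_getElem _ _ hlt, List.getD_eq_getElem _ _ hc,
      List.getElem_append_left hc]
  · have hsub : (k + t) % A.length = k + t - A.length := by
      rw [Nat.mod_eq_sub_mod (by omega), Nat.mod_eq_of_lt (by omega)]
    rw [hsub, List.getD_eq_getElem _ _ hlt, List.getD_eq_getElem _ _ (by omega),
      List.getElem_append_right (by omega)]

-- Two lists of the same length agreeing at every getD position are equal.
theorem getD_ext (X Y : List Int) (hlen : X.length = Y.length)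
    (h : ∀ t, t < X.length → X.getD t 0 = Y.getD t 0) : X = Y := by
  apply List.ext_getElem hlen
  intro t h1 h2
  have key := h t h1
  rwa [List.getD_eq_getElem _ _ h1, List.getD_eq_getElem _ _ h2] at key

theorem rotate_getD (A : List Int) (i s N : Nat) (hN : N = A.length) (hs : s < N) :
    (A.rotate i).getD s 0 = A.getD ((i + s) % N) 0 := by
  subst hN
  have h1 : s < (A.rotate i).length := by simp; omega
  have h2 : (i + s) % A.length < A.length := Nat.mod_lt _ (by omega)
  rw [List.getD_eq_getElem _ _ h1, List.getD_eq_getElem _ _ h2, List.getElem_rotate]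
  congr 1
  rw [Nat.add_comm]

-- Strict lexicographic comparison from a first difference.
theorem lex_of_first_diff (d : Nat) : ∀ (X Y : List Int), d < X.length → d < Y.length →
    (∀ s, s < d → X.getD s 0 = Y.getD s 0) → Y.getD d 0 < X.getD d 0 → Y < X := by
  induction d with
  | zero =>
    intro X Y hX hY _ hlt
    match X, Y with
    | x :: X', y :: Y' =>
      rw [List.cons_lt_cons_iff]
      left
      simpa using hlt
  | succ d ih =>
    intro X Y hX hY hagree hlt
    match X, Y with
    | x :: X', y :: Y' =>
      rw [List.cons_lt_cons_iff]
      right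
      constructor
      · have := hagree 0 (Nat.succ_pos d); simpa using this.symm
      · exact ih X' Y' (by simpa using hX) (by simpa using hY)
          (fun s hs => by simpa using hagree (s + 1) (by omega)) (by simpa using hlt)

-- A nonempty list of lists has a least element (lexicographic linear order).
theorem exists_min_list : ∀ (xs : List (List Int)), xs ≠ [] → ∃ m ∈ xs, ∀ b ∈ xs, m ≤ b := by
  intro xs hne
  induction xs with
  | nil => exact absurd rfl hne
  | cons x xs ih =>
    by_cases hxs : xs = []
    · exact ⟨x, by simp, by simp [hxs]⟩
    · obtain ⟨m, hm, hmin⟩ := ih hxs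
      rcases le_total x m with hxm | hmx
      · refine ⟨x, by simp, ?_⟩
        intro b hb
        rcases List.mem_cons.mp hb with rfl | hb
        · exact le_refl _
        · exact le_trans hxm (hmin b hb)
      · refine ⟨m, List.mem_cons_of_mem _ hm, ?_⟩
        intro b hb
        rcases List.mem_cons.mp hb with rfl | hb
        · exact hmx
        · exact hmin b hb

-- Full cyclic agreement of a_i and b_j means A and B are rotations of each other.
theorem agree_rotated (A B : List Int) (N : Nat) (hNA : N = A.length) (hNB : N = B.length)
    (i j : Nat) (hagree : ∀ t, t < N → A.getD ((i + t) % N) 0 = B.getD ((j + t) % N) 0) :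
    A ~r B := by
  have hEq : A.rotate i = B.rotate j := by
    rcases Nat.eq_zero_or_pos N with hN0 | hN0
    · have hA : A = [] := List.length_eq_zero_iff.mp (by omega)
      have hB : B = [] := List.length_eq_zero_iff.mp (by omega)
      simp [hA, hB]
    · apply List.ext_getElem (by simp; omega)
      intro s hs1 hs2
      have hsN : s < N := by have := hs1; simp at this; omega
      have key := hagree s hsN
      have hA : (i + s) % N < A.length := by rw [← hNA]; exact Nat.mod_lt _ (by omega)
      have hB : (j + s) % N < B.length := by rw [← hNB]; exact Nat.mod_lt _ (by omega)
      rw [List.getD_eq_getElem _ _ hA, List.getD_eq_getElem _ _ hB] at key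
      rw [List.getElem_rotate, List.getElem_rotate]
      have e1 : (s + i) % A.length = (i + s) % N := by rw [← hNA, Nat.add_comm]
      have e2 : (s + j) % B.length = (j + s) % N := by rw [← hNB, Nat.add_comm]
      simp only [e1, e2]
      exact key
  have h1 : A ~r A.rotate i := ⟨i, rfl⟩
  have h2 : B ~r B.rotate j := ⟨j, rfl⟩
  exact (hEq ▸ h1).trans h2.symm

-- Soundness: a true answer with the invariant "the first h cyclic symbols of a_i and b_j agree"
-- implies A and B are rotations of each other.
theorem ceLoop_sound (A B : List Int) (N : Nat) (hNA : N = A.length) (hNB : N = B.length) :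
    ∀ fuel h i j, 3 * N - (h + i + j) ≤ fuel → h ≤ N →
    (∀ t, t < h → A.getD ((i + t) % N) 0 = B.getD ((j + t) % N) 0) →
    ceLoop A B N h i j = true → A ~r B := by
  intro fuel
  induction fuel with
  | zero =>
    intro h i j hfuel hh hagree hres
    rw [ceLoop] at hres
    split at hres
    · omega
    · have hNh : N ≤ h := by simpa using hres
      exact agree_rotated A B N hNA hNB i j (fun t ht => hagree t (by omega))
  | succ fuel ih =>
    intro h i j hfuel hh hagree hres
    rw [ceLoop] at hres
    split at hres
    next hg =>
      obtain ⟨hhN, hiN, hjN⟩ := hg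
      by_cases heq : A.getD ((i + h) % N) 0 = B.getD ((j + h) % N) 0
      · rw [if_pos heq] at hres
        refine ih (h + 1) i j (by omega) (by omega) ?_ hres
        intro t ht
        rcases Nat.lt_succ_iff_lt_or_eq.mp ht with ht | rfl
        · exact hagree t ht
        · exact heq
      · rw [if_neg heq] at hres
        by_cases hgt : A.getD ((i + h) % N) 0 > B.getD ((j + h) % N) 0
        · rw [if_pos hgt] at hres
          exact ih 0 (i + h + 1) j (by omega) (by omega)
            (fun t ht => absurd ht (Nat.not_lt_zero t)) hres
        · rw [if_neg hgt] at hres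
          exact ih 0 i (j + h + 1) (by omega) (by omega)
            (fun t ht => absurd ht (Nat.not_lt_zero t)) hres
    next hg =>
      have hNh : N ≤ h := by simpa using hres
      exact agree_rotated A B N hNA hNB i j (fun t ht => hagree t (by omega))

-- Completeness: if A and B are rotations of each other the loop answers true.
-- Invariant: a least rotation M is still reachable at an index ≥ i in A and ≥ j in B,
-- and a_i, b_j agree on their first h cyclic symbols (Shiloach's argument).
theorem ceLoop_complete (A B : List Int) (N : Nat) (hNA : N = A.length) (hNB : N = B.length)
    (M : List Int) (hMA : ∀ p, p < N → M ≤ A.rotate p) (hMB : ∀ q, q < N → M ≤ B.rotate q) :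
    ∀ fuel h i j, 3 * N - (h + i + j) ≤ fuel →
    (∃ p, i ≤ p ∧ p < N ∧ A.rotate p = M) →
    (∃ q, j ≤ q ∧ q < N ∧ B.rotate q = M) →
    (∀ t, t < h → A.getD ((i + t) % N) 0 = B.getD ((j + t) % N) 0) →
    ceLoop A B N h i j = true := by
  intro fuel
  induction fuel with
  | zero =>
    intro h i j hfuel hP hQ hagree
    obtain ⟨p, hip, hpN, _⟩ := hP
    obtain ⟨q, hjq, hqN, _⟩ := hQ
    rw [ceLoop]
    split
    · omega
    · simp only [ge_iff_le, decide_eq_true_eq]; omega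
  | succ fuel ih =>
    intro h i j hfuel hP hQ hagree
    obtain ⟨p, hip, hpN, hpM⟩ := hP
    obtain ⟨q, hjq, hqN, hqM⟩ := hQ
    rw [ceLoop]
    split
    next hg =>
      obtain ⟨hhN, hiN, hjN⟩ := hg
      have hN0 : 0 < N := by omega
      -- discard: a mismatch A[(i+h)%N] > B[(j+h)%N] rules out a_{i+t}, t ≤ h, as the minimum
      have discard : A.getD ((i + h) % N) 0 > B.getD ((j + h) % N) 0 →
          ∀ t, t ≤ h → A.rotate (i + t) ≠ M := by
        intro hgt t htle hMeq
        have hlt : B.rotate ((j + t) % N) < A.rotate (i + t) := by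
          apply lex_of_first_diff (h - t)
          · simp; omega
          · simp; omega
          · intro s hs
            rw [rotate_getD A (i + t) s N hNA (by omega),
                rotate_getD B ((j + t) % N) s N hNB (by omega)]
            have key := hagree (t + s) (by omega)
            have e1 : (i + t + s) % N = (i + (t + s)) % N := by rw [Nat.add_assoc]
            have e2 : ((j + t) % N + s) % N = (j + (t + s)) % N := by
              conv_rhs => rw [show j + (t + s) = (j + t) + s by omega]
              rw [Nat.mod_add_mod]
            rw [e1, e2]
            exact key
          · rw [rotate_getD A (i + t) (h - t) N hNA (by omega),
                rotate_getD B ((j + t) % N) (h - t) N hNB (by omega)]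
            have e1 : i + t + (h - t) = i + h := by omega
            have e2 : ((j + t) % N + (h - t)) % N = (j + h) % N := by
              conv_rhs => rw [show j + h = (j + t) + (h - t) by omega]
              rw [Nat.mod_add_mod]
            rw [e1, e2]
            exact hgt
        have hge : M ≤ B.rotate ((j + t) % N) := hMB _ (Nat.mod_lt _ hN0)
        rw [hMeq] at hlt
        exact absurd (lt_of_le_of_lt hge hlt) (lt_irrefl M)
      have discardB : B.getD ((j + h) % N) 0 > A.getD ((i + h) % N) 0 →
          ∀ t, t ≤ h → B.rotate (j + t) ≠ M := by
        intro hgt t htle hMeq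
        have hlt : A.rotate ((i + t) % N) < B.rotate (j + t) := by
          apply lex_of_first_diff (h - t)
          · simp; omega
          · simp; omega
          · intro s hs
            rw [rotate_getD B (j + t) s N hNB (by omega),
                rotate_getD A ((i + t) % N) s N hNA (by omega)]
            have key := hagree (t + s) (by omega)
            have e1 : (j + t + s) % N = (j + (t + s)) % N := by rw [Nat.add_assoc]
            have e2 : ((i + t) % N + s) % N = (i + (t + s)) % N := by
              conv_rhs => rw [show i + (t + s) = (i + t) + s by omega]
              rw [Nat.mod_add_mod]
            rw [e1, e2]
            exact key.symm
          · rw [rotate_getD B (j + t) (h - t) N hNB (by omega),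
                rotate_getD A ((i + t) % N) (h - t) N hNA (by omega)]
            have e1 : j + t + (h - t) = j + h := by omega
            have e2 : ((i + t) % N + (h - t)) % N = (i + h) % N := by
              conv_rhs => rw [show i + h = (i + t) + (h - t) by omega]
              rw [Nat.mod_add_mod]
            rw [e1, e2]
            exact hgt
        have hge : M ≤ A.rotate ((i + t) % N) := hMA _ (Nat.mod_lt _ hN0)
        rw [hMeq] at hlt
        exact absurd (lt_of_le_of_lt hge hlt) (lt_irrefl M)
      by_cases heq : A.getD ((i + h) % N) 0 = B.getD ((j + h) % N) 0
      · rw [if_pos heq]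
        refine ih (h + 1) i j (by omega) ⟨p, hip, hpN, hpM⟩ ⟨q, hjq, hqN, hqM⟩ ?_
        intro t ht
        rcases Nat.lt_succ_iff_lt_or_eq.mp ht with ht | rfl
        · exact hagree t ht
        · exact heq
      · rw [if_neg heq]
        by_cases hgt : A.getD ((i + h) % N) 0 > B.getD ((j + h) % N) 0
        · rw [if_pos hgt]
          have hpbig : i + h + 1 ≤ p := by
            by_contra hc
            exact discard hgt (p - i) (by omega)
              (by rw [show i + (p - i) = p by omega]; exact hpM)
          exact ih 0 (i + h + 1) j (by omega) ⟨p, hpbig, hpN, hpM⟩ ⟨q, hjq, hqN, hqM⟩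
            (fun t ht => absurd ht (Nat.not_lt_zero t))
        · rw [if_neg hgt]
          have hlt : B.getD ((j + h) % N) 0 > A.getD ((i + h) % N) 0 :=
            lt_of_le_of_ne (not_lt.mp hgt) heq
          have hqbig : j + h + 1 ≤ q := by
            by_contra hc
            exact discardB hlt (q - j) (by omega)
              (by rw [show j + (q - j) = q by omega]; exact hqM)
          exact ih 0 i (j + h + 1) (by omega) ⟨p, hip, hpN, hpM⟩ ⟨q, hqbig, hqN, hqM⟩
            (fun t ht => absurd ht (Nat.not_lt_zero t))
    next hg =>
      simp only [ge_iff_le, decide_eq_true_eq]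
      by_contra hc
      exact hg ⟨by omega, by omega, by omega⟩

-- B's port answers true exactly on cyclic rotations.
theorem alt_iff_rotated (A B : List Int) : cyclically_equal_alt A B = true ↔ A ~r B := by
  unfold cyclically_equal_alt
  by_cases hlen : A.length = B.length
  · rw [if_neg (by omega)]
    by_cases hA : A = []
    · have hB : B = [] := List.length_eq_zero_iff.mp (by rw [← hlen, hA]; rfl)
      rw [if_pos hA]
      exact ⟨fun _ => by rw [hA, hB], fun _ => rfl⟩
    · rw [if_neg hA, List.any_eq_true]
      have hN0 : 0 < A.length := List.length_pos_iff.mpr hA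
      have inner : ∀ k : Nat, k < A.length →
          (((PySem.List.pyRange 0 (B.length : Int) 1).all (fun t =>
            PySem.List.pyGetD (A ++ A) ((k : Int) + t) 0 == PySem.List.pyGetD B t 0)) = true
           ↔ A.rotate k = B) := by
        intro k hk
        rw [List.all_eq_true]
        constructor
        · intro hall
          apply getD_ext _ _ (by simp [hlen])
          intro t ht
          have htN : t < A.length := by simpa using ht
          have key := hall ((t : Int)) (PySem.List.mem_pyRange_one.mpr ⟨by positivity, by omega⟩)
          rw [show ((k : Int) + (t : Int)) = ((k + t : Nat) : Int) by push_cast; ring,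
              PySem.List.pyGetD_natCast, PySem.List.pyGetD_natCast, beq_iff_eq] at key
          rw [rotate_getD A k t A.length rfl htN, ← double_getD A k t A.length rfl hk htN]
          exact key
        · intro hrot x hx
          obtain ⟨hx0, hxN⟩ := PySem.List.mem_pyRange_one.mp hx
          have hxt : x = ((x.toNat : Nat) : Int) := (Int.toNat_of_nonneg hx0).symm
          have htN : x.toNat < A.length := by omega
          rw [hxt, show ((k : Int) + ((x.toNat : Nat) : Int)) = ((k + x.toNat : Nat) : Int)
                by push_cast; ring,
              PySem.List.pyGetD_natCast, PySem.List.pyGetD_natCast, beq_iff_eq,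
              double_getD A k x.toNat A.length rfl hk htN,
              ← rotate_getD A k x.toNat A.length rfl htN, hrot]
      constructor
      · rintro ⟨x, hx, hpx⟩
        obtain ⟨hx0, hxN⟩ := PySem.List.mem_pyRange_one.mp hx
        have hxk : x = ((x.toNat : Nat) : Int) := (Int.toNat_of_nonneg hx0).symm
        rw [hxk] at hpx
        exact ⟨x.toNat, (inner x.toNat (by omega)).mp hpx⟩
      · intro h
        obtain ⟨n, hn, hrot⟩ := List.isRotated_iff_mod.mp h
        have hkN : n % A.length < A.length := Nat.mod_lt _ hN0
        refine ⟨((n % A.length : Nat) : Int), PySem.List.mem_pyRange_one.mpr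
          ⟨by positivity, by exact_mod_cast hkN⟩, ?_⟩
        exact (inner _ hkN).mpr (by rw [List.rotate_mod, hrot])
  · rw [if_pos hlen]
    constructor
    · intro h; exact absurd h (by simp)
    · rintro ⟨n, rfl⟩
      exact absurd (by simp) hlen

-- A's port answers true exactly on cyclic rotations.
theorem a_iff_rotated (A B : List Int) : cyclically_equal A B = true ↔ A ~r B := by
  unfold cyclically_equal
  by_cases hlen : A.length = B.length
  · rw [if_neg (by omega)]
    constructor
    · intro hres
      exact ceLoop_sound A B A.length rfl hlen (3 * A.length) 0 0 0 (by omega) (by omega)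
        (fun t ht => absurd ht (Nat.not_lt_zero t)) hres
    · intro h
      rcases Nat.eq_zero_or_pos A.length with hN0 | hN0
      · rw [ceLoop]
        rw [if_neg (by omega)]
        simp [hN0]
      · -- choose a least rotation M of A (equivalently of B)
        obtain ⟨M, hMmem, hMmin⟩ := exists_min_list ((List.range A.length).map (A.rotate ·))
          (by simp only [ne_eq, List.map_eq_nil_iff, List.range_eq_nil]; omega)
        obtain ⟨p, hpN, hpM⟩ := by simpa using hMmem
        have hMA : ∀ p', p' < A.length → M ≤ A.rotate p' := by
          intro p' hp'
          exact hMmin _ (by simp; exact ⟨p', hp', rfl⟩)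
        obtain ⟨kb, hkbrot⟩ := List.IsRotated.symm h
        obtain ⟨n, hnrot⟩ := h
        have hMB : ∀ q, q < B.length → M ≤ B.rotate q := by
          intro q hq
          have : B.rotate q = A.rotate ((n + q) % A.length) := by
            rw [List.rotate_mod, ← List.rotate_rotate, hnrot]
          rw [this]
          exact hMA _ (Nat.mod_lt _ hN0)
        have hQ : ∃ q, 0 ≤ q ∧ q < A.length ∧ B.rotate q = M := by
          refine ⟨(kb + p) % B.length, Nat.zero_le _, ?_, ?_⟩
          · rw [hlen]
            exact Nat.mod_lt _ (hlen ▸ hN0)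
          · rw [List.rotate_mod, ← List.rotate_rotate, hkbrot, hpM]
        exact ceLoop_complete A B A.length rfl hlen M hMA (fun q hq => hMB q (by omega))
          (3 * A.length) 0 0 0 (by omega) ⟨p, Nat.zero_le _, hpN, hpM⟩ hQ
          (fun t ht => absurd ht (Nat.not_lt_zero t))
  · rw [if_pos hlen]
    constructor
    · intro h; exact absurd h (by simp)
    · rintro ⟨n, rfl⟩
      exact absurd (by simp) hlen

-- ===== VERDICT (by name: the statement is the Claim_ definition above) =====
theorem cyclically_equal_spec : Claim_equal_cyclically_equal := by
  intro A B _
  unfold Spec_cyclically_equal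
  rw [Bool.eq_iff_iff, a_iff_rotated, alt_iff_rotated]
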